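-- pv_equiv track=rewrite | github.com/Mm7/is_lab1 | task1.py | round_func
-- ===== SOURCE A (Python) =====
-- L = 16
--
-- KEY_LEN = 32
--
-- def round_func(y, rk):
--     w = 0
--
--     # First half of the block.
--     for j in range(L//2):
--         # Compute the jth bit of the block. The formula is adjusted
--         # to a 0-based range.
--         k_index = 4*(j+1)-3-1
--         assert k_index >= 0 and k_index < KEY_LEN
--         j_bit = ((y >> j) & 1) ^ ((rk >> k_index) & 1)
--
--         # Copy the bit to the block.
--         w |= (j_bit << j)
--
--     # Second half of the block.
--     for j in range(L//2, L):
--         k_index = 4*(j+1)-2*L-1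
--         assert k_index >= 0 and k_index < KEY_LEN
--         j_bit = ((y >> j) & 1) ^ ((rk >> k_index) & 1)
--
--         w |= (j_bit << j)
--
--     return w
-- ===== SOURCE B (Python) =====
-- L = 16
--
-- KEY_LEN = 32
--
-- def round_func(y, rk):
--     # Scan the round key nibble by nibble (8 nibbles of the 32-bit key):
--     # bit 0 of nibble i is the keystream bit for block position i, bit 3 of
--     # nibble i the keystream bit for block position i + 8.  Concatenate the
--     # two bytes and apply the keystream with a single XOR onto the low 16
--     # bits of the block.
--     r = rk & 0xFFFFFFFF
--     lo = 0
--     hi = 0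
--     for i in range(8):
--         nib = (r >> (4 * i)) & 0xF
--         lo |= (nib & 1) << i
--         hi |= ((nib >> 3) & 1) << i
--     return (y & 0xFFFF) ^ (lo | (hi << 8))
-- ===== Notes on version B (the rewrite author's own statement) =====
-- stated objective: alternative
-- what changed: B derives the keystream by scanning the 32-bit round key nibble-by-nibble (8 nibbles, peeling bit 0 into a low byte and bit 3 into a high byte in two parallel accumulators), concatenates the two bytes and applies them with one XOR to the low 16 bits of y, instead of A's two per-block-bit loops that compute a key index 4(j+1)-3-1 / 4(j+1)-2L-1 for each of the 16 block bits and extract, XOR and re-insert each bit individually.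
import Mathlib
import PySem

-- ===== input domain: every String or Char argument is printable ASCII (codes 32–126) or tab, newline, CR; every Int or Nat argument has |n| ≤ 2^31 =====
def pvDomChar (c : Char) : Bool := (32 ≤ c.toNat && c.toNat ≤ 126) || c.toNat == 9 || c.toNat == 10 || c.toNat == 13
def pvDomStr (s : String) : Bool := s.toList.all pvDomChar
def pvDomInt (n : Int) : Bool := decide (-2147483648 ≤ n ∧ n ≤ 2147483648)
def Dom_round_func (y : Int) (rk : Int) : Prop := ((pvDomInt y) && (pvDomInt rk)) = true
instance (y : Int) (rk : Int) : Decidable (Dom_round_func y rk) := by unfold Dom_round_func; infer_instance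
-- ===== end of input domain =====

-- B derives the keystream by a nibble scan of the round key (bit 0 / bit 3 of each nibble
-- into two byte accumulators) and applies it with a single XOR to the low 16 bits of the
-- block, instead of A's two per-block-bit index-formula loops (objective: alternative).


-- ===== PORT A =====
-- L = 16, KEY_LEN = 32 (module constants, inlined as the literals 16 and 32)
def round_func (y : Int) (rk : Int) : Int :=
  -- First half of the block: for j in range(L//2)
  let w : Int := (PySem.List.pyRange 0 (PySem.Int.floordiv 16 2) 1).foldl (fun (w j : Int) =>
    let k_index := 4*(j+1)-3-1
    -- (the assert 0 ≤ k_index < 32 always holds and never fires)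
    let j_bit := PySem.Int.bxor (PySem.Int.band (y >>> j.toNat) 1) (PySem.Int.band (rk >>> k_index.toNat) 1)
    PySem.Int.bor w (j_bit <<< j.toNat)) 0
  -- Second half of the block: for j in range(L//2, L)
  (PySem.List.pyRange (PySem.Int.floordiv 16 2) 16 1).foldl (fun (w j : Int) =>
    let k_index := 4*(j+1)-2*16-1
    let j_bit := PySem.Int.bxor (PySem.Int.band (y >>> j.toNat) 1) (PySem.Int.band (rk >>> k_index.toNat) 1)
    PySem.Int.bor w (j_bit <<< j.toNat)) w

-- ===== PORT B =====
def round_func_alt (y : Int) (rk : Int) : Int :=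
  let r : Int := PySem.Int.band rk 0xFFFFFFFF
  let p : Int × Int := (PySem.List.pyRange 0 8 1).foldl (fun (p : Int × Int) (i : Int) =>
    let nib := PySem.Int.band (r >>> (4*i).toNat) 0xF
    (PySem.Int.bor p.1 ((PySem.Int.band nib 1) <<< i.toNat),
     PySem.Int.bor p.2 ((PySem.Int.band (nib >>> (3:Nat)) 1) <<< i.toNat))) (0, 0)
  PySem.Int.bxor (PySem.Int.band y 0xFFFF) (PySem.Int.bor p.1 (p.2 <<< (8:Nat)))

-- ===== PRECONDITION & SPEC =====
-- (A is total: both loops run over fixed nonnegative indices, every shift amount is a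
-- nonnegative literal and the asserts always hold, so no Pre_ is needed.)
def Spec_round_func (y : Int) (rk : Int) (out : Int) : Prop := out = round_func_alt y rk
instance (y : Int) (rk : Int) (out : Int) : Decidable (Spec_round_func y rk out) := by unfold Spec_round_func; infer_instance

-- ===== CLAIM (what is proved, stated in full; the proofs are below) =====
def Claim_equal_round_func : Prop := ∀ (y : Int) (rk : Int), Dom_round_func y rk → Spec_round_func y rk (round_func y rk)

-- ===== LEMMAS AND PROOFS =====
theorem l_bit0 (x : Int) : PySem.Int.band x 1 = x % 2 := by
  rw [PySem.Int.band_one]; simp [PySem.Int.mod, Int.fmod_eq_emod]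

theorem l_mask (y : Int) : PySem.Int.band y 65535 = y % 65536 := by
  unfold PySem.Int.band
  split_ifs with h1 h2 h2
  · rw [show ((65535:Int).toNat) = 65535 from rfl, Nat.and_two_pow_sub_one_eq_mod y.toNat 16]
    omega
  · omega
  · rw [show ((65535:Int).toNat) = 65535 from rfl]
    have hland : (65535 &&& (-y-1).toNat) = (-y-1).toNat % 65536 := by
      rw [Nat.land_comm]; exact Nat.and_two_pow_sub_one_eq_mod (-y-1).toNat 16
    rw [hland]
    have hm : ((-y-1).toNat : Int) = -y-1 := Int.toNat_of_nonneg (by omega)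
    omega
  · omega

theorem l_mask32 (y : Int) : PySem.Int.band y 4294967295 = y % 4294967296 := by
  unfold PySem.Int.band
  split_ifs with h1 h2 h2
  · rw [show ((4294967295:Int).toNat) = 4294967295 from rfl, Nat.and_two_pow_sub_one_eq_mod y.toNat 32]
    omega
  · omega
  · rw [show ((4294967295:Int).toNat) = 4294967295 from rfl]
    have hland : (4294967295 &&& (-y-1).toNat) = (-y-1).toNat % 4294967296 := by
      rw [Nat.land_comm]; exact Nat.and_two_pow_sub_one_eq_mod (-y-1).toNat 32
    rw [hland]
    have hm : ((-y-1).toNat : Int) = -y-1 := Int.toNat_of_nonneg (by omega)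
    omega
  · omega

theorem l_mask4 (y : Int) : PySem.Int.band y 15 = y % 16 := by
  unfold PySem.Int.band
  split_ifs with h1 h2 h2
  · rw [show ((15:Int).toNat) = 15 from rfl, Nat.and_two_pow_sub_one_eq_mod y.toNat 4]
    omega
  · omega
  · rw [show ((15:Int).toNat) = 15 from rfl]
    have hland : (15 &&& (-y-1).toNat) = (-y-1).toNat % 16 := by
      rw [Nat.land_comm]; exact Nat.and_two_pow_sub_one_eq_mod (-y-1).toNat 4
    rw [hland]
    have hm : ((-y-1).toNat : Int) = -y-1 := Int.toNat_of_nonneg (by omega)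
    omega
  · omega

theorem nat_lor_shl : ∀ (k w c : Nat), w < 2^k → w ||| (c <<< k) = w + c * 2^k := by
  intro k
  induction k with
  | zero =>
    intro w c h
    interval_cases w
    simp [Nat.shiftLeft_eq]
  | succ k ih =>
    intro w c h
    have h2 : 2^(k+1) = 2*2^k := by ring
    have hw2 : w / 2 < 2^k := by omega
    have hc : c <<< (k+1) = Nat.bit false (c <<< k) := by
      simp [Nat.bit, Nat.shiftLeft_eq]; ring
    have hb : w % 2 = 0 ∨ w % 2 = 1 := by omega
    rcases hb with hb | hb
    · have hw : w = Nat.bit false (w/2) := by simp [Nat.bit]; omega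
      rw [hw, hc, Nat.lor_bit, ih _ _ hw2]
      simp [Nat.bit]
      rw [h2]; ring
    · have hw : w = Nat.bit true (w/2) := by simp [Nat.bit]; omega
      rw [hw, hc, Nat.lor_bit, ih _ _ hw2]
      simp [Nat.bit]
      rw [h2]; ring

theorem l_bor_shl (w c : Int) (j : Nat) (hw0 : 0 ≤ w) (hwj : w < 2^j) (hc : 0 ≤ c) :
    PySem.Int.bor w (c <<< j) = w + c * 2^j := by
  obtain ⟨wn, rfl⟩ := Int.eq_ofNat_of_zero_le hw0
  obtain ⟨cn, rfl⟩ := Int.eq_ofNat_of_zero_le hc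
  rw [show ((cn:Int) <<< j) = ((cn <<< j : Nat) : Int) from by
        rw [Int.shiftLeft_eq, Nat.shiftLeft_eq]; push_cast; ring,
      PySem.Int.bor_natCast, nat_lor_shl j wn cn (by exact_mod_cast hwj)]
  push_cast [Nat.shiftLeft_eq]
  ring

theorem chain8 (b0 b1 b2 b3 b4 b5 b6 b7 : Int)
    (h0 : 0 ≤ b0 ∧ b0 ≤ 1) (h1 : 0 ≤ b1 ∧ b1 ≤ 1) (h2 : 0 ≤ b2 ∧ b2 ≤ 1) (h3 : 0 ≤ b3 ∧ b3 ≤ 1)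
    (h4 : 0 ≤ b4 ∧ b4 ≤ 1) (h5 : 0 ≤ b5 ∧ b5 ≤ 1) (h6 : 0 ≤ b6 ∧ b6 ≤ 1) (h7 : 0 ≤ b7 ∧ b7 ≤ 1) :
    PySem.Int.bor (PySem.Int.bor (PySem.Int.bor (PySem.Int.bor (PySem.Int.bor (PySem.Int.bor (PySem.Int.bor (PySem.Int.bor 0 b0) (b1 <<< (1:Nat))) (b2 <<< (2:Nat))) (b3 <<< (3:Nat))) (b4 <<< (4:Nat))) (b5 <<< (5:Nat))) (b6 <<< (6:Nat))) (b7 <<< (7:Nat))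
      = b0 + b1 * 2 + b2 * 4 + b3 * 8 + b4 * 16 + b5 * 32 + b6 * 64 + b7 * 128 := by
  rw [show PySem.Int.bor 0 b0 = b0 from by rw [PySem.Int.bor_comm]; simp]
  rw [show PySem.Int.bor (b0) (b1 <<< (1:Nat)) = b0 + b1 * 2 from by rw [l_bor_shl (b0) b1 1 (by omega) (by omega) (by omega)]; norm_num]
  rw [show PySem.Int.bor (b0 + b1 * 2) (b2 <<< (2:Nat)) = b0 + b1 * 2 + b2 * 4 from by rw [l_bor_shl (b0 + b1 * 2) b2 2 (by omega) (by omega) (by omega)]; norm_num]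
  rw [show PySem.Int.bor (b0 + b1 * 2 + b2 * 4) (b3 <<< (3:Nat)) = b0 + b1 * 2 + b2 * 4 + b3 * 8 from by rw [l_bor_shl (b0 + b1 * 2 + b2 * 4) b3 3 (by omega) (by omega) (by omega)]; norm_num]
  rw [show PySem.Int.bor (b0 + b1 * 2 + b2 * 4 + b3 * 8) (b4 <<< (4:Nat)) = b0 + b1 * 2 + b2 * 4 + b3 * 8 + b4 * 16 from by rw [l_bor_shl (b0 + b1 * 2 + b2 * 4 + b3 * 8) b4 4 (by omega) (by omega) (by omega)]; norm_num]
  rw [show PySem.Int.bor (b0 + b1 * 2 + b2 * 4 + b3 * 8 + b4 * 16) (b5 <<< (5:Nat)) = b0 + b1 * 2 + b2 * 4 + b3 * 8 + b4 * 16 + b5 * 32 from by rw [l_bor_shl (b0 + b1 * 2 + b2 * 4 + b3 * 8 + b4 * 16) b5 5 (by omega) (by omega) (by omega)]; norm_num]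
  rw [show PySem.Int.bor (b0 + b1 * 2 + b2 * 4 + b3 * 8 + b4 * 16 + b5 * 32) (b6 <<< (6:Nat)) = b0 + b1 * 2 + b2 * 4 + b3 * 8 + b4 * 16 + b5 * 32 + b6 * 64 from by rw [l_bor_shl (b0 + b1 * 2 + b2 * 4 + b3 * 8 + b4 * 16 + b5 * 32) b6 6 (by omega) (by omega) (by omega)]; norm_num]
  rw [show PySem.Int.bor (b0 + b1 * 2 + b2 * 4 + b3 * 8 + b4 * 16 + b5 * 32 + b6 * 64) (b7 <<< (7:Nat)) = b0 + b1 * 2 + b2 * 4 + b3 * 8 + b4 * 16 + b5 * 32 + b6 * 64 + b7 * 128 from by rw [l_bor_shl (b0 + b1 * 2 + b2 * 4 + b3 * 8 + b4 * 16 + b5 * 32 + b6 * 64) b7 7 (by omega) (by omega) (by omega)]; norm_num]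

theorem l_xbit (a b : Int) (ha : a = 0 ∨ a = 1) (hb : b = 0 ∨ b = 1) :
    PySem.Int.bxor a b = 0 ∨ PySem.Int.bxor a b = 1 := by
  rcases ha with rfl | rfl <;> rcases hb with rfl | rfl <;> simp [PySem.Int.bxor]

theorem nat_xor_split (a b x y : Nat) (ha : a ≤ 1) (hb : b ≤ 1) :
    (a + 2*x) ^^^ (b + 2*y) = (a ^^^ b) + 2*(x ^^^ y) := by
  have h00 := Nat.xor_bit false x false y
  have h01 := Nat.xor_bit false x true y
  have h10 := Nat.xor_bit true x false y
  have h11 := Nat.xor_bit true x true y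
  simp [Nat.bit] at h00 h01 h10 h11
  interval_cases a <;> interval_cases b
  · simpa [Nat.add_comm] using h00
  · simpa [Nat.add_comm] using h01
  · simpa [Nat.add_comm] using h10
  · simpa [Nat.add_comm] using h11

theorem l_xsplit (a b x y : Int) (ha : a = 0 ∨ a = 1) (hb : b = 0 ∨ b = 1)
    (hx : 0 ≤ x) (hy : 0 ≤ y) :
    PySem.Int.bxor (a + 2*x) (b + 2*y) = PySem.Int.bxor a b + 2 * PySem.Int.bxor x y := by
  obtain ⟨xn, rfl⟩ := Int.eq_ofNat_of_zero_le hx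
  obtain ⟨yn, rfl⟩ := Int.eq_ofNat_of_zero_le hy
  have key : ∀ an bn : Nat, an ≤ 1 → bn ≤ 1 →
      PySem.Int.bxor ((an:Int) + 2*(xn:Int)) ((bn:Int) + 2*(yn:Int))
        = PySem.Int.bxor (an:Int) (bn:Int) + 2 * PySem.Int.bxor (xn:Int) (yn:Int) := by
    intro an bn han hbn
    rw [show ((an:Int) + 2*(xn:Int)) = ((an + 2*xn : Nat) : Int) from by push_cast; ring,
        show ((bn:Int) + 2*(yn:Int)) = ((bn + 2*yn : Nat) : Int) from by push_cast; ring,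
        PySem.Int.bxor_natCast, PySem.Int.bxor_natCast, PySem.Int.bxor_natCast,
        nat_xor_split an bn xn yn han hbn]
    push_cast; ring
  rcases ha with rfl | rfl <;> rcases hb with rfl | rfl
  · exact_mod_cast key 0 0 (by omega) (by omega)
  · exact_mod_cast key 0 1 (by omega) (by omega)
  · exact_mod_cast key 1 0 (by omega) (by omega)
  · exact_mod_cast key 1 1 (by omega) (by omega)

set_option maxHeartbeats 2000000 in
theorem assemble (a0 a1 a2 a3 a4 a5 a6 a7 a8 a9 a10 a11 a12 a13 a14 a15 s0 s1 s2 s3 s4 s5 s6 s7 s8 s9 s10 s11 s12 s13 s14 s15 : Int)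
    (ha0 : 0 ≤ a0 ∧ a0 ≤ 1) (hs0 : 0 ≤ s0 ∧ s0 ≤ 1)
    (ha1 : 0 ≤ a1 ∧ a1 ≤ 1) (hs1 : 0 ≤ s1 ∧ s1 ≤ 1)
    (ha2 : 0 ≤ a2 ∧ a2 ≤ 1) (hs2 : 0 ≤ s2 ∧ s2 ≤ 1)
    (ha3 : 0 ≤ a3 ∧ a3 ≤ 1) (hs3 : 0 ≤ s3 ∧ s3 ≤ 1)
    (ha4 : 0 ≤ a4 ∧ a4 ≤ 1) (hs4 : 0 ≤ s4 ∧ s4 ≤ 1)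
    (ha5 : 0 ≤ a5 ∧ a5 ≤ 1) (hs5 : 0 ≤ s5 ∧ s5 ≤ 1)
    (ha6 : 0 ≤ a6 ∧ a6 ≤ 1) (hs6 : 0 ≤ s6 ∧ s6 ≤ 1)
    (ha7 : 0 ≤ a7 ∧ a7 ≤ 1) (hs7 : 0 ≤ s7 ∧ s7 ≤ 1)
    (ha8 : 0 ≤ a8 ∧ a8 ≤ 1) (hs8 : 0 ≤ s8 ∧ s8 ≤ 1)
    (ha9 : 0 ≤ a9 ∧ a9 ≤ 1) (hs9 : 0 ≤ s9 ∧ s9 ≤ 1)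
    (ha10 : 0 ≤ a10 ∧ a10 ≤ 1) (hs10 : 0 ≤ s10 ∧ s10 ≤ 1)
    (ha11 : 0 ≤ a11 ∧ a11 ≤ 1) (hs11 : 0 ≤ s11 ∧ s11 ≤ 1)
    (ha12 : 0 ≤ a12 ∧ a12 ≤ 1) (hs12 : 0 ≤ s12 ∧ s12 ≤ 1)
    (ha13 : 0 ≤ a13 ∧ a13 ≤ 1) (hs13 : 0 ≤ s13 ∧ s13 ≤ 1)
    (ha14 : 0 ≤ a14 ∧ a14 ≤ 1) (hs14 : 0 ≤ s14 ∧ s14 ≤ 1)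
    (ha15 : 0 ≤ a15 ∧ a15 ≤ 1) (hs15 : 0 ≤ s15 ∧ s15 ≤ 1) :
    PySem.Int.bor (PySem.Int.bor (PySem.Int.bor (PySem.Int.bor (PySem.Int.bor (PySem.Int.bor (PySem.Int.bor (PySem.Int.bor (PySem.Int.bor (PySem.Int.bor (PySem.Int.bor (PySem.Int.bor (PySem.Int.bor (PySem.Int.bor (PySem.Int.bor (PySem.Int.bor 0 (PySem.Int.bxor a0 s0)) (PySem.Int.bxor a1 s1 <<< (1 : Nat))) (PySem.Int.bxor a2 s2 <<< (2 : Nat))) (PySem.Int.bxor a3 s3 <<< (3 : Nat))) (PySem.Int.bxor a4 s4 <<< (4 : Nat))) (PySem.Int.bxor a5 s5 <<< (5 : Nat))) (PySem.Int.bxor a6 s6 <<< (6 : Nat))) (PySem.Int.bxor a7 s7 <<< (7 : Nat))) (PySem.Int.bxor a8 s8 <<< (8 : Nat))) (PySem.Int.bxor a9 s9 <<< (9 : Nat))) (PySem.Int.bxor a10 s10 <<< (10 : Nat))) (PySem.Int.bxor a11 s11 <<< (11 : Nat))) (PySem.Int.bxor a12 s12 <<< (12 : Nat))) (PySem.Int.bxor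 a13 s13 <<< (13 : Nat))) (PySem.Int.bxor a14 s14 <<< (14 : Nat))) (PySem.Int.bxor a15 s15 <<< (15 : Nat)) = PySem.Int.bxor (a0 * 1 + a1 * 2 + a2 * 4 + a3 * 8 + a4 * 16 + a5 * 32 + a6 * 64 + a7 * 128 + a8 * 256 + a9 * 512 + a10 * 1024 + a11 * 2048 + a12 * 4096 + a13 * 8192 + a14 * 16384 + a15 * 32768) (PySem.Int.bor (s0 + s1 * 2 + s2 * 4 + s3 * 8 + s4 * 16 + s5 * 32 + s6 * 64 + s7 * 128) ((s8 + s9 * 2 + s10 * 4 + s11 * 8 + s12 * 16 + s13 * 32 + s14 * 64 + s15 * 128) <<< (8:Nat))) := by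
  have hC0 : 0 ≤ PySem.Int.bxor a0 s0 ∧ PySem.Int.bxor a0 s0 ≤ 1 := by
    rcases l_xbit a0 s0 (by omega) (by omega) with h | h <;> omega
  have hC1 : 0 ≤ PySem.Int.bxor a1 s1 ∧ PySem.Int.bxor a1 s1 ≤ 1 := by
    rcases l_xbit a1 s1 (by omega) (by omega) with h | h <;> omega
  have hC2 : 0 ≤ PySem.Int.bxor a2 s2 ∧ PySem.Int.bxor a2 s2 ≤ 1 := by
    rcases l_xbit a2 s2 (by omega) (by omega) with h | h <;> omega
  have hC3 : 0 ≤ PySem.Int.bxor a3 s3 ∧ PySem.Int.bxor a3 s3 ≤ 1 := by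
    rcases l_xbit a3 s3 (by omega) (by omega) with h | h <;> omega
  have hC4 : 0 ≤ PySem.Int.bxor a4 s4 ∧ PySem.Int.bxor a4 s4 ≤ 1 := by
    rcases l_xbit a4 s4 (by omega) (by omega) with h | h <;> omega
  have hC5 : 0 ≤ PySem.Int.bxor a5 s5 ∧ PySem.Int.bxor a5 s5 ≤ 1 := by
    rcases l_xbit a5 s5 (by omega) (by omega) with h | h <;> omega
  have hC6 : 0 ≤ PySem.Int.bxor a6 s6 ∧ PySem.Int.bxor a6 s6 ≤ 1 := by
    rcases l_xbit a6 s6 (by omega) (by omega) with h | h <;> omega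
  have hC7 : 0 ≤ PySem.Int.bxor a7 s7 ∧ PySem.Int.bxor a7 s7 ≤ 1 := by
    rcases l_xbit a7 s7 (by omega) (by omega) with h | h <;> omega
  have hC8 : 0 ≤ PySem.Int.bxor a8 s8 ∧ PySem.Int.bxor a8 s8 ≤ 1 := by
    rcases l_xbit a8 s8 (by omega) (by omega) with h | h <;> omega
  have hC9 : 0 ≤ PySem.Int.bxor a9 s9 ∧ PySem.Int.bxor a9 s9 ≤ 1 := by
    rcases l_xbit a9 s9 (by omega) (by omega) with h | h <;> omega
  have hC10 : 0 ≤ PySem.Int.bxor a10 s10 ∧ PySem.Int.bxor a10 s10 ≤ 1 := by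
    rcases l_xbit a10 s10 (by omega) (by omega) with h | h <;> omega
  have hC11 : 0 ≤ PySem.Int.bxor a11 s11 ∧ PySem.Int.bxor a11 s11 ≤ 1 := by
    rcases l_xbit a11 s11 (by omega) (by omega) with h | h <;> omega
  have hC12 : 0 ≤ PySem.Int.bxor a12 s12 ∧ PySem.Int.bxor a12 s12 ≤ 1 := by
    rcases l_xbit a12 s12 (by omega) (by omega) with h | h <;> omega
  have hC13 : 0 ≤ PySem.Int.bxor a13 s13 ∧ PySem.Int.bxor a13 s13 ≤ 1 := by
    rcases l_xbit a13 s13 (by omega) (by omega) with h | h <;> omega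
  have hC14 : 0 ≤ PySem.Int.bxor a14 s14 ∧ PySem.Int.bxor a14 s14 ≤ 1 := by
    rcases l_xbit a14 s14 (by omega) (by omega) with h | h <;> omega
  have hC15 : 0 ≤ PySem.Int.bxor a15 s15 ∧ PySem.Int.bxor a15 s15 ≤ 1 := by
    rcases l_xbit a15 s15 (by omega) (by omega) with h | h <;> omega
  rw [show PySem.Int.bor 0 (PySem.Int.bxor a0 s0) = PySem.Int.bxor a0 s0 from by rw [PySem.Int.bor_comm]; simp]
  rw [show PySem.Int.bor ((PySem.Int.bxor a0 s0)) ((PySem.Int.bxor a1 s1) <<< (1:Nat)) = (PySem.Int.bxor a0 s0) + (PySem.Int.bxor a1 s1) * 2 from by rw [l_bor_shl ((PySem.Int.bxor a0 s0)) (PySem.Int.bxor a1 s1) 1 (by omega) (by omega) (by omega)]; norm_num]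
  rw [show PySem.Int.bor ((PySem.Int.bxor a0 s0) + (PySem.Int.bxor a1 s1) * 2) ((PySem.Int.bxor a2 s2) <<< (2:Nat)) = (PySem.Int.bxor a0 s0) + (PySem.Int.bxor a1 s1) * 2 + (PySem.Int.bxor a2 s2) * 4 from by rw [l_bor_shl ((PySem.Int.bxor a0 s0) + (PySem.Int.bxor a1 s1) * 2) (PySem.Int.bxor a2 s2) 2 (by omega) (by omega) (by omega)]; norm_num]
  rw [show PySem.Int.bor ((PySem.Int.bxor a0 s0) + (PySem.Int.bxor a1 s1) * 2 + (PySem.Int.bxor a2 s2) * 4) ((PySem.Int.bxor a3 s3) <<< (3:Nat)) = (PySem.Int.bxor a0 s0) + (PySem.Int.bxor a1 s1) * 2 + (PySem.Int.bxor a2 s2) * 4 + (PySem.Int.bxor a3 s3) * 8 from by rw [l_bor_shl ((PySem.Int.bxor a0 s0) + (PySem.Int.bxor a1 s1) * 2 + (PySem.Int.bxor a2 s2) * 4) (PySem.Int.bxor a3 s3) 3 (by omega) (by omega) (by omega)]; norm_num]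
  rw [show PySem.Int.bor ((PySem.Int.bxor a0 s0) + (PySem.Int.bxor a1 s1) * 2 + (PySem.Int.bxor a2 s2) * 4 + (PySem.Int.bxor a3 s3) * 8) ((PySem.Int.bxor a4 s4) <<< (4:Nat)) = (PySem.Int.bxor a0 s0) + (PySem.Int.bxor a1 s1) * 2 + (PySem.Int.bxor a2 s2) * 4 + (PySem.Int.bxor a3 s3) * 8 + (PySem.Int.bxor a4 s4) * 16 from by rw [l_bor_shl ((PySem.Int.bxor a0 s0) + (PySem.Int.bxor a1 s1) * 2 + (PySem.Int.bxor a2 s2) * 4 + (PySem.Int.bxor a3 s3) * 8) (PySem.Int.bxor a4 s4) 4 (by omega) (by omega) (by omega)]; norm_num]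
  rw [show PySem.Int.bor ((PySem.Int.bxor a0 s0) + (PySem.Int.bxor a1 s1) * 2 + (PySem.Int.bxor a2 s2) * 4 + (PySem.Int.bxor a3 s3) * 8 + (PySem.Int.bxor a4 s4) * 16) ((PySem.Int.bxor a5 s5) <<< (5:Nat)) = (PySem.Int.bxor a0 s0) + (PySem.Int.bxor a1 s1) * 2 + (PySem.Int.bxor a2 s2) * 4 + (PySem.Int.bxor a3 s3) * 8 + (PySem.Int.bxor a4 s4) * 16 + (PySem.Int.bxor a5 s5) * 32 from by rw [l_bor_shl ((PySem.Int.bxor a0 s0) + (PySem.Int.bxor a1 s1) * 2 + (PySem.Int.bxor a2 s2) * 4 + (PySem.Int.bxor a3 s3) * 8 + (PySem.Int.bxor a4 s4) * 16) (PySem.Int.bxor a5 s5) 5 (by omega) (by omega) (by omega)]; norm_num]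
  rw [show PySem.Int.bor ((PySem.Int.bxor a0 s0) + (PySem.Int.bxor a1 s1) * 2 + (PySem.Int.bxor a2 s2) * 4 + (PySem.Int.bxor a3 s3) * 8 + (PySem.Int.bxor a4 s4) * 16 + (PySem.Int.bxor a5 s5) * 32) ((PySem.Int.bxor a6 s6) <<< (6:Nat)) = (PySem.Int.bxor a0 s0) + (PySem.Int.bxor a1 s1) * 2 + (PySem.Int.bxor a2 s2) * 4 + (PySem.Int.bxor a3 s3) * 8 + (PySem.Int.bxor a4 s4) * 16 + (PySem.Int.bxor a5 s5) * 32 + (PySem.Int.bxor a6 s6) * 64 from by rw [l_bor_shl ((PySem.Int.bxor a0 s0) + (PySem.Int.bxor a1 s1) * 2 + (PySem.Int.bxor a2 s2) * 4 + (PySem.Int.bxor a3 s3) * 8 + (PySem.Int.bxor a4 s4) * 16 + (PySem.Int.bxor a5 s5) * 32) (PySem.Int.bxor a6 s6) 6 (by omega) (by omega) (by omega)]; norm_num]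
  rw [show PySem.Int.bor ((PySem.Int.bxor a0 s0) + (PySem.Int.bxor a1 s1) * 2 + (PySem.Int.bxor a2 s2) * 4 + (PySem.Int.bxor a3 s3) * 8 + (PySem.Int.bxor a4 s4) * 16 + (PySem.Int.bxor a5 s5) * 32 + (PySem.Int.bxor a6 s6) * 64) ((PySem.Int.bxor a7 s7) <<< (7:Nat)) = (PySem.Int.bxor a0 s0) + (PySem.Int.bxor a1 s1) * 2 + (PySem.Int.bxor a2 s2) * 4 + (PySem.Int.bxor a3 s3) * 8 + (PySem.Int.bxor a4 s4) * 16 + (PySem.Int.bxor a5 s5) * 32 + (PySem.Int.bxor a6 s6) * 64 + (PySem.Int.bxor a7 s7) * 128 from by rw [l_bor_shl ((PySem.Int.bxor a0 s0) + (PySem.Int.bxor a1 s1) * 2 + (PySem.Int.bxor a2 s2) * 4 + (PySem.Int.bxor a3 s3) * 8 + (PySem.Int.bxor a4 s4) * 16 + (PySem.Int.bxor a5 s5) * 32 + (PySem.Int.bxor a6 s6) * 64) (PySem.Int.bxor a7 s7) 7 (by omega) (by omega) (by omega)]; norm_num]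
  rw [show PySem.Int.bor ((PySem.Int.bxor a0 s0) + (PySem.Int.bxor a1 s1) * 2 + (PySem.Int.bxor a2 s2) * 4 + (PySem.Int.bxor a3 s3) * 8 + (PySem.Int.bxor a4 s4) * 16 + (PySem.Int.bxor a5 s5) * 32 + (PySem.Int.bxor a6 s6) * 64 + (PySem.Int.bxor a7 s7) * 128) ((PySem.Int.bxor a8 s8) <<< (8:Nat)) = (PySem.Int.bxor a0 s0) + (PySem.Int.bxor a1 s1) * 2 + (PySem.Int.bxor a2 s2) * 4 + (PySem.Int.bxor a3 s3) * 8 + (PySem.Int.bxor a4 s4) * 16 + (PySem.Int.bxor a5 s5) * 32 + (PySem.Int.bxor a6 s6) * 64 + (PySem.Int.bxor a7 s7) * 128 + (PySem.Int.bxor a8 s8) * 256 from by rw [l_bor_shl ((PySem.Int.bxor a0 s0) + (PySem.Int.bxor a1 s1) * 2 + (PySem.Int.bxor a2 s2) * 4 + (PySem.Int.bxor a3 s3) * 8 + (PySem.Int.bxor a4 s4) * 16 + (PySem.Int.bxor a5 s5) * 32 + (PySem.Int.bxor a6 s6) * 64 + (PySem.Int.bxor a7 s7) * 128) (PySem.Int.bxor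 a8 s8) 8 (by omega) (by omega) (by omega)]; norm_num]
  rw [show PySem.Int.bor ((PySem.Int.bxor a0 s0) + (PySem.Int.bxor a1 s1) * 2 + (PySem.Int.bxor a2 s2) * 4 + (PySem.Int.bxor a3 s3) * 8 + (PySem.Int.bxor a4 s4) * 16 + (PySem.Int.bxor a5 s5) * 32 + (PySem.Int.bxor a6 s6) * 64 + (PySem.Int.bxor a7 s7) * 128 + (PySem.Int.bxor a8 s8) * 256) ((PySem.Int.bxor a9 s9) <<< (9:Nat)) = (PySem.Int.bxor a0 s0) + (PySem.Int.bxor a1 s1) * 2 + (PySem.Int.bxor a2 s2) * 4 + (PySem.Int.bxor a3 s3) * 8 + (PySem.Int.bxor a4 s4) * 16 + (PySem.Int.bxor a5 s5) * 32 + (PySem.Int.bxor a6 s6) * 64 + (PySem.Int.bxor a7 s7) * 128 + (PySem.Int.bxor a8 s8) * 256 + (PySem.Int.bxor a9 s9) * 512 from by rw [l_bor_shl ((PySem.Int.bxor a0 s0) + (PySem.Int.bxor a1 s1) * 2 + (PySem.Int.bxor a2 s2) * 4 + (PySem.Int.bxor a3 s3) * 8 + (PySem.Int.bxor a4 s4)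 * 16 + (PySem.Int.bxor a5 s5) * 32 + (PySem.Int.bxor a6 s6) * 64 + (PySem.Int.bxor a7 s7) * 128 + (PySem.Int.bxor a8 s8) * 256) (PySem.Int.bxor a9 s9) 9 (by omega) (by omega) (by omega)]; norm_num]
  rw [show PySem.Int.bor ((PySem.Int.bxor a0 s0) + (PySem.Int.bxor a1 s1) * 2 + (PySem.Int.bxor a2 s2) * 4 + (PySem.Int.bxor a3 s3) * 8 + (PySem.Int.bxor a4 s4) * 16 + (PySem.Int.bxor a5 s5) * 32 + (PySem.Int.bxor a6 s6) * 64 + (PySem.Int.bxor a7 s7) * 128 + (PySem.Int.bxor a8 s8) * 256 + (PySem.Int.bxor a9 s9) * 512) ((PySem.Int.bxor a10 s10) <<< (10:Nat)) = (PySem.Int.bxor a0 s0) + (PySem.Int.bxor a1 s1) * 2 + (PySem.Int.bxor a2 s2) * 4 + (PySem.Int.bxor a3 s3) * 8 + (PySem.Int.bxor a4 s4) * 16 + (PySem.Int.bxor a5 s5) * 32 + (PySem.Int.bxor a6 s6) * 64 + (PySem.Int.bxor a7 s7) * 128 + (PySem.Int.bxor a8 s8) * 256 + (PySem.Int.bxor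 a9 s9) * 512 + (PySem.Int.bxor a10 s10) * 1024 from by rw [l_bor_shl ((PySem.Int.bxor a0 s0) + (PySem.Int.bxor a1 s1) * 2 + (PySem.Int.bxor a2 s2) * 4 + (PySem.Int.bxor a3 s3) * 8 + (PySem.Int.bxor a4 s4) * 16 + (PySem.Int.bxor a5 s5) * 32 + (PySem.Int.bxor a6 s6) * 64 + (PySem.Int.bxor a7 s7) * 128 + (PySem.Int.bxor a8 s8) * 256 + (PySem.Int.bxor a9 s9) * 512) (PySem.Int.bxor a10 s10) 10 (by omega) (by omega) (by omega)]; norm_num]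
  rw [show PySem.Int.bor ((PySem.Int.bxor a0 s0) + (PySem.Int.bxor a1 s1) * 2 + (PySem.Int.bxor a2 s2) * 4 + (PySem.Int.bxor a3 s3) * 8 + (PySem.Int.bxor a4 s4) * 16 + (PySem.Int.bxor a5 s5) * 32 + (PySem.Int.bxor a6 s6) * 64 + (PySem.Int.bxor a7 s7) * 128 + (PySem.Int.bxor a8 s8) * 256 + (PySem.Int.bxor a9 s9) * 512 + (PySem.Int.bxor a10 s10) * 1024) ((PySem.Int.bxor a11 s11) <<< (11:Nat)) = (PySem.Int.bxor a0 s0) + (PySem.Int.bxor a1 s1) * 2 + (PySem.Int.bxor a2 s2) * 4 + (PySem.Int.bxor a3 s3) * 8 + (PySem.Int.bxor a4 s4) * 16 + (PySem.Int.bxor a5 s5) * 32 + (PySem.Int.bxor a6 s6) * 64 + (PySem.Int.bxor a7 s7) * 128 + (PySem.Int.bxor a8 s8) * 256 + (PySem.Int.bxor a9 s9) * 512 + (PySem.Int.bxor a10 s10) * 1024 + (PySem.Int.bxor a11 s11) * 2048 from by rw [l_bor_shl ((PySem.Int.bxor a0 s0) + (PySem.Int.bxor a1 s1) * 2 + (PySem.Int.bxor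 a2 s2) * 4 + (PySem.Int.bxor a3 s3) * 8 + (PySem.Int.bxor a4 s4) * 16 + (PySem.Int.bxor a5 s5) * 32 + (PySem.Int.bxor a6 s6) * 64 + (PySem.Int.bxor a7 s7) * 128 + (PySem.Int.bxor a8 s8) * 256 + (PySem.Int.bxor a9 s9) * 512 + (PySem.Int.bxor a10 s10) * 1024) (PySem.Int.bxor a11 s11) 11 (by omega) (by omega) (by omega)]; norm_num]
  rw [show PySem.Int.bor ((PySem.Int.bxor a0 s0) + (PySem.Int.bxor a1 s1) * 2 + (PySem.Int.bxor a2 s2) * 4 + (PySem.Int.bxor a3 s3) * 8 + (PySem.Int.bxor a4 s4) * 16 + (PySem.Int.bxor a5 s5) * 32 + (PySem.Int.bxor a6 s6) * 64 + (PySem.Int.bxor a7 s7) * 128 + (PySem.Int.bxor a8 s8) * 256 + (PySem.Int.bxor a9 s9) * 512 + (PySem.Int.bxor a10 s10) * 1024 + (PySem.Int.bxor a11 s11) * 2048) ((PySem.Int.bxor a12 s12) <<< (12:Nat)) = (PySem.Int.bxor a0 s0) + (PySem.Int.bxor a1 s1) * 2 + (PySem.Int.bxor a2 s2) * 4 + (PySem.Int.bxor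 a3 s3) * 8 + (PySem.Int.bxor a4 s4) * 16 + (PySem.Int.bxor a5 s5) * 32 + (PySem.Int.bxor a6 s6) * 64 + (PySem.Int.bxor a7 s7) * 128 + (PySem.Int.bxor a8 s8) * 256 + (PySem.Int.bxor a9 s9) * 512 + (PySem.Int.bxor a10 s10) * 1024 + (PySem.Int.bxor a11 s11) * 2048 + (PySem.Int.bxor a12 s12) * 4096 from by rw [l_bor_shl ((PySem.Int.bxor a0 s0) + (PySem.Int.bxor a1 s1) * 2 + (PySem.Int.bxor a2 s2) * 4 + (PySem.Int.bxor a3 s3) * 8 + (PySem.Int.bxor a4 s4) * 16 + (PySem.Int.bxor a5 s5) * 32 + (PySem.Int.bxor a6 s6) * 64 + (PySem.Int.bxor a7 s7) * 128 + (PySem.Int.bxor a8 s8) * 256 + (PySem.Int.bxor a9 s9) * 512 + (PySem.Int.bxor a10 s10) * 1024 + (PySem.Int.bxor a11 s11) * 2048) (PySem.Int.bxor a12 s12) 12 (by omega) (by omega) (by omega)]; norm_num]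
  rw [show PySem.Int.bor ((PySem.Int.bxor a0 s0) + (PySem.Int.bxor a1 s1) * 2 + (PySem.Int.bxor a2 s2) * 4 + (PySem.Int.bxor a3 s3) * 8 + (PySem.Int.bxor a4 s4) * 16 + (PySem.Int.bxor a5 s5) * 32 + (PySem.Int.bxor a6 s6) * 64 + (PySem.Int.bxor a7 s7) * 128 + (PySem.Int.bxor a8 s8) * 256 + (PySem.Int.bxor a9 s9) * 512 + (PySem.Int.bxor a10 s10) * 1024 + (PySem.Int.bxor a11 s11) * 2048 + (PySem.Int.bxor a12 s12) * 4096) ((PySem.Int.bxor a13 s13) <<< (13:Nat)) = (PySem.Int.bxor a0 s0) + (PySem.Int.bxor a1 s1) * 2 + (PySem.Int.bxor a2 s2) * 4 + (PySem.Int.bxor a3 s3) * 8 + (PySem.Int.bxor a4 s4) * 16 + (PySem.Int.bxor a5 s5) * 32 + (PySem.Int.bxor a6 s6) * 64 + (PySem.Int.bxor a7 s7) * 128 + (PySem.Int.bxor a8 s8) * 256 + (PySem.Int.bxor a9 s9) * 512 + (PySem.Int.bxor a10 s10) * 1024 + (PySem.Int.bxor a11 s11) * 2048 + (PySem.Int.bxor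 a12 s12) * 4096 + (PySem.Int.bxor a13 s13) * 8192 from by rw [l_bor_shl ((PySem.Int.bxor a0 s0) + (PySem.Int.bxor a1 s1) * 2 + (PySem.Int.bxor a2 s2) * 4 + (PySem.Int.bxor a3 s3) * 8 + (PySem.Int.bxor a4 s4) * 16 + (PySem.Int.bxor a5 s5) * 32 + (PySem.Int.bxor a6 s6) * 64 + (PySem.Int.bxor a7 s7) * 128 + (PySem.Int.bxor a8 s8) * 256 + (PySem.Int.bxor a9 s9) * 512 + (PySem.Int.bxor a10 s10) * 1024 + (PySem.Int.bxor a11 s11) * 2048 + (PySem.Int.bxor a12 s12) * 4096) (PySem.Int.bxor a13 s13) 13 (by omega) (by omega) (by omega)]; norm_num]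
  rw [show PySem.Int.bor ((PySem.Int.bxor a0 s0) + (PySem.Int.bxor a1 s1) * 2 + (PySem.Int.bxor a2 s2) * 4 + (PySem.Int.bxor a3 s3) * 8 + (PySem.Int.bxor a4 s4) * 16 + (PySem.Int.bxor a5 s5) * 32 + (PySem.Int.bxor a6 s6) * 64 + (PySem.Int.bxor a7 s7) * 128 + (PySem.Int.bxor a8 s8) * 256 + (PySem.Int.bxor a9 s9) * 512 + (PySem.Int.bxor a10 s10) * 1024 + (PySem.Int.bxor a11 s11) * 2048 + (PySem.Int.bxor a12 s12) * 4096 + (PySem.Int.bxor a13 s13) * 8192) ((PySem.Int.bxor a14 s14) <<< (14:Nat)) = (PySem.Int.bxor a0 s0) + (PySem.Int.bxor a1 s1) * 2 + (PySem.Int.bxor a2 s2) * 4 + (PySem.Int.bxor a3 s3) * 8 + (PySem.Int.bxor a4 s4) * 16 + (PySem.Int.bxor a5 s5) * 32 + (PySem.Int.bxor a6 s6) * 64 + (PySem.Int.bxor a7 s7) * 128 + (PySem.Int.bxor a8 s8) * 256 + (PySem.Int.bxor a9 s9) * 512 + (PySem.Int.bxor a10 s10) * 1024 + (PySem.Int.bxor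 a11 s11) * 2048 + (PySem.Int.bxor a12 s12) * 4096 + (PySem.Int.bxor a13 s13) * 8192 + (PySem.Int.bxor a14 s14) * 16384 from by rw [l_bor_shl ((PySem.Int.bxor a0 s0) + (PySem.Int.bxor a1 s1) * 2 + (PySem.Int.bxor a2 s2) * 4 + (PySem.Int.bxor a3 s3) * 8 + (PySem.Int.bxor a4 s4) * 16 + (PySem.Int.bxor a5 s5) * 32 + (PySem.Int.bxor a6 s6) * 64 + (PySem.Int.bxor a7 s7) * 128 + (PySem.Int.bxor a8 s8) * 256 + (PySem.Int.bxor a9 s9) * 512 + (PySem.Int.bxor a10 s10) * 1024 + (PySem.Int.bxor a11 s11) * 2048 + (PySem.Int.bxor a12 s12) * 4096 + (PySem.Int.bxor a13 s13) * 8192) (PySem.Int.bxor a14 s14) 14 (by omega) (by omega) (by omega)]; norm_num]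
  rw [show PySem.Int.bor ((PySem.Int.bxor a0 s0) + (PySem.Int.bxor a1 s1) * 2 + (PySem.Int.bxor a2 s2) * 4 + (PySem.Int.bxor a3 s3) * 8 + (PySem.Int.bxor a4 s4) * 16 + (PySem.Int.bxor a5 s5) * 32 + (PySem.Int.bxor a6 s6) * 64 + (PySem.Int.bxor a7 s7) * 128 + (PySem.Int.bxor a8 s8) * 256 + (PySem.Int.bxor a9 s9) * 512 + (PySem.Int.bxor a10 s10) * 1024 + (PySem.Int.bxor a11 s11) * 2048 + (PySem.Int.bxor a12 s12) * 4096 + (PySem.Int.bxor a13 s13) * 8192 + (PySem.Int.bxor a14 s14) * 16384) ((PySem.Int.bxor a15 s15) <<< (15:Nat)) = (PySem.Int.bxor a0 s0) + (PySem.Int.bxor a1 s1) * 2 + (PySem.Int.bxor a2 s2) * 4 + (PySem.Int.bxor a3 s3) * 8 + (PySem.Int.bxor a4 s4) * 16 + (PySem.Int.bxor a5 s5) * 32 + (PySem.Int.bxor a6 s6) * 64 + (PySem.Int.bxor a7 s7) * 128 + (PySem.Int.bxor a8 s8) * 256 + (PySem.Int.bxor a9 s9) * 512 + (PySem.Int.bxor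 a10 s10) * 1024 + (PySem.Int.bxor a11 s11) * 2048 + (PySem.Int.bxor a12 s12) * 4096 + (PySem.Int.bxor a13 s13) * 8192 + (PySem.Int.bxor a14 s14) * 16384 + (PySem.Int.bxor a15 s15) * 32768 from by rw [l_bor_shl ((PySem.Int.bxor a0 s0) + (PySem.Int.bxor a1 s1) * 2 + (PySem.Int.bxor a2 s2) * 4 + (PySem.Int.bxor a3 s3) * 8 + (PySem.Int.bxor a4 s4) * 16 + (PySem.Int.bxor a5 s5) * 32 + (PySem.Int.bxor a6 s6) * 64 + (PySem.Int.bxor a7 s7) * 128 + (PySem.Int.bxor a8 s8) * 256 + (PySem.Int.bxor a9 s9) * 512 + (PySem.Int.bxor a10 s10) * 1024 + (PySem.Int.bxor a11 s11) * 2048 + (PySem.Int.bxor a12 s12) * 4096 + (PySem.Int.bxor a13 s13) * 8192 + (PySem.Int.bxor a14 s14) * 16384) (PySem.Int.bxor a15 s15) 15 (by omega) (by omega) (by omega)]; norm_num]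
  rw [show PySem.Int.bor (s0 + s1 * 2 + s2 * 4 + s3 * 8 + s4 * 16 + s5 * 32 + s6 * 64 + s7 * 128) ((s8 + s9 * 2 + s10 * 4 + s11 * 8 + s12 * 16 + s13 * 32 + s14 * 64 + s15 * 128) <<< (8:Nat)) = s0 * 1 + s1 * 2 + s2 * 4 + s3 * 8 + s4 * 16 + s5 * 32 + s6 * 64 + s7 * 128 + s8 * 256 + s9 * 512 + s10 * 1024 + s11 * 2048 + s12 * 4096 + s13 * 8192 + s14 * 16384 + s15 * 32768 from by rw [l_bor_shl (s0 + s1 * 2 + s2 * 4 + s3 * 8 + s4 * 16 + s5 * 32 + s6 * 64 + s7 * 128) (s8 + s9 * 2 + s10 * 4 + s11 * 8 + s12 * 16 + s13 * 32 + s14 * 64 + s15 * 128) 8 (by omega) (by omega) (by omega)]; norm_num; ring]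
  rw [show PySem.Int.bxor (a0 * 1 + a1 * 2 + a2 * 4 + a3 * 8 + a4 * 16 + a5 * 32 + a6 * 64 + a7 * 128 + a8 * 256 + a9 * 512 + a10 * 1024 + a11 * 2048 + a12 * 4096 + a13 * 8192 + a14 * 16384 + a15 * 32768) (s0 * 1 + s1 * 2 + s2 * 4 + s3 * 8 + s4 * 16 + s5 * 32 + s6 * 64 + s7 * 128 + s8 * 256 + s9 * 512 + s10 * 1024 + s11 * 2048 + s12 * 4096 + s13 * 8192 + s14 * 16384 + s15 * 32768) = PySem.Int.bxor a0 s0 + 2 * PySem.Int.bxor (a1 * 1 + a2 * 2 + a3 * 4 + a4 * 8 + a5 * 16 + a6 * 32 + a7 * 64 + a8 * 128 + a9 * 256 + a10 * 512 + a11 * 1024 + a12 * 2048 + a13 * 4096 + a14 * 8192 + a15 * 16384) (s1 * 1 + s2 * 2 + s3 * 4 + s4 * 8 + s5 * 16 + s6 * 32 + s7 * 64 + s8 * 128 + s9 * 256 + s10 * 512 + s11 * 1024 + s12 * 2048 + s13 * 4096 + s14 * 8192 + s15 * 16384) from by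
    conv_lhs => rw [show (a0 * 1 + a1 * 2 + a2 * 4 + a3 * 8 + a4 * 16 + a5 * 32 + a6 * 64 + a7 * 128 + a8 * 256 + a9 * 512 + a10 * 1024 + a11 * 2048 + a12 * 4096 + a13 * 8192 + a14 * 16384 + a15 * 32768 : Int) = a0 + 2*(a1 * 1 + a2 * 2 + a3 * 4 + a4 * 8 + a5 * 16 + a6 * 32 + a7 * 64 + a8 * 128 + a9 * 256 + a10 * 512 + a11 * 1024 + a12 * 2048 + a13 * 4096 + a14 * 8192 + a15 * 16384) from by ring,
        show (s0 * 1 + s1 * 2 + s2 * 4 + s3 * 8 + s4 * 16 + s5 * 32 + s6 * 64 + s7 * 128 + s8 * 256 + s9 * 512 + s10 * 1024 + s11 * 2048 + s12 * 4096 + s13 * 8192 + s14 * 16384 + s15 * 32768 : Int) = s0 + 2*(s1 * 1 + s2 * 2 + s3 * 4 + s4 * 8 + s5 * 16 + s6 * 32 + s7 * 64 + s8 * 128 + s9 * 256 + s10 * 512 + s11 * 1024 + s12 * 2048 + s13 * 4096 + s14 * 8192 + s15 * 16384) from by ring]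
    exact l_xsplit a0 s0 (a1 * 1 + a2 * 2 + a3 * 4 + a4 * 8 + a5 * 16 + a6 * 32 + a7 * 64 + a8 * 128 + a9 * 256 + a10 * 512 + a11 * 1024 + a12 * 2048 + a13 * 4096 + a14 * 8192 + a15 * 16384) (s1 * 1 + s2 * 2 + s3 * 4 + s4 * 8 + s5 * 16 + s6 * 32 + s7 * 64 + s8 * 128 + s9 * 256 + s10 * 512 + s11 * 1024 + s12 * 2048 + s13 * 4096 + s14 * 8192 + s15 * 16384) (by omega) (by omega) (by omega) (by omega)]
  rw [show PySem.Int.bxor (a1 * 1 + a2 * 2 + a3 * 4 + a4 * 8 + a5 * 16 + a6 * 32 + a7 * 64 + a8 * 128 + a9 * 256 + a10 * 512 + a11 * 1024 + a12 * 2048 + a13 * 4096 + a14 * 8192 + a15 * 16384) (s1 * 1 + s2 * 2 + s3 * 4 + s4 * 8 + s5 * 16 + s6 * 32 + s7 * 64 + s8 * 128 + s9 * 256 + s10 * 512 + s11 * 1024 + s12 * 2048 + s13 * 4096 + s14 * 8192 + s15 * 16384) = PySem.Int.bxor a1 s1 + 2 * PySem.Int.bxor (a2 * 1 + a3 * 2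 + a4 * 4 + a5 * 8 + a6 * 16 + a7 * 32 + a8 * 64 + a9 * 128 + a10 * 256 + a11 * 512 + a12 * 1024 + a13 * 2048 + a14 * 4096 + a15 * 8192) (s2 * 1 + s3 * 2 + s4 * 4 + s5 * 8 + s6 * 16 + s7 * 32 + s8 * 64 + s9 * 128 + s10 * 256 + s11 * 512 + s12 * 1024 + s13 * 2048 + s14 * 4096 + s15 * 8192) from by
    conv_lhs => rw [show (a1 * 1 + a2 * 2 + a3 * 4 + a4 * 8 + a5 * 16 + a6 * 32 + a7 * 64 + a8 * 128 + a9 * 256 + a10 * 512 + a11 * 1024 + a12 * 2048 + a13 * 4096 + a14 * 8192 + a15 * 16384 : Int) = a1 + 2*(a2 * 1 + a3 * 2 + a4 * 4 + a5 * 8 + a6 * 16 + a7 * 32 + a8 * 64 + a9 * 128 + a10 * 256 + a11 * 512 + a12 * 1024 + a13 * 2048 + a14 * 4096 + a15 * 8192) from by ring,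
        show (s1 * 1 + s2 * 2 + s3 * 4 + s4 * 8 + s5 * 16 + s6 * 32 + s7 * 64 + s8 * 128 + s9 * 256 + s10 * 512 + s11 * 1024 + s12 * 2048 + s13 * 4096 + s14 * 8192 + s15 * 16384 : Int) = s1 + 2*(s2 * 1 + s3 * 2 + s4 * 4 + s5 * 8 + s6 * 16 + s7 * 32 + s8 * 64 + s9 * 128 + s10 * 256 + s11 * 512 + s12 * 1024 + s13 * 2048 + s14 * 4096 + s15 * 8192) from by ring]
    exact l_xsplit a1 s1 (a2 * 1 + a3 * 2 + a4 * 4 + a5 * 8 + a6 * 16 + a7 * 32 + a8 * 64 + a9 * 128 + a10 * 256 + a11 * 512 + a12 * 1024 + a13 * 2048 + a14 * 4096 + a15 * 8192) (s2 * 1 + s3 * 2 + s4 * 4 + s5 * 8 + s6 * 16 + s7 * 32 + s8 * 64 + s9 * 128 + s10 * 256 + s11 * 512 + s12 * 1024 + s13 * 2048 + s14 * 4096 + s15 * 8192) (by omega) (by omega) (by omega) (by omega)]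
  rw [show PySem.Int.bxor (a2 * 1 + a3 * 2 + a4 * 4 + a5 * 8 + a6 * 16 + a7 * 32 + a8 * 64 + a9 * 128 + a10 * 256 + a11 * 512 + a12 * 1024 + a13 * 2048 + a14 * 4096 + a15 * 8192) (s2 * 1 + s3 * 2 + s4 * 4 + s5 * 8 + s6 * 16 + s7 * 32 + s8 * 64 + s9 * 128 + s10 * 256 + s11 * 512 + s12 * 1024 + s13 * 2048 + s14 * 4096 + s15 * 8192) = PySem.Int.bxor a2 s2 + 2 * PySem.Int.bxor (a3 * 1 + a4 * 2 + a5 * 4 + a6 * 8 + a7 * 16 + a8 * 32 + a9 * 64 + a10 * 128 + a11 * 256 + a12 * 512 + a13 * 1024 + a14 * 2048 + a15 * 4096) (s3 * 1 + s4 * 2 + s5 * 4 + s6 * 8 + s7 * 16 + s8 * 32 + s9 * 64 + s10 * 128 + s11 * 256 + s12 * 512 + s13 * 1024 + s14 * 2048 + s15 * 4096) from by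
    conv_lhs => rw [show (a2 * 1 + a3 * 2 + a4 * 4 + a5 * 8 + a6 * 16 + a7 * 32 + a8 * 64 + a9 * 128 + a10 * 256 + a11 * 512 + a12 * 1024 + a13 * 2048 + a14 * 4096 + a15 * 8192 : Int) = a2 + 2*(a3 * 1 + a4 * 2 + a5 * 4 + a6 * 8 + a7 * 16 + a8 * 32 + a9 * 64 + a10 * 128 + a11 * 256 + a12 * 512 + a13 * 1024 + a14 * 2048 + a15 * 4096) from by ring,
        show (s2 * 1 + s3 * 2 + s4 * 4 + s5 * 8 + s6 * 16 + s7 * 32 + s8 * 64 + s9 * 128 + s10 * 256 + s11 * 512 + s12 * 1024 + s13 * 2048 + s14 * 4096 + s15 * 8192 : Int) = s2 + 2*(s3 * 1 + s4 * 2 + s5 * 4 + s6 * 8 + s7 * 16 + s8 * 32 + s9 * 64 + s10 * 128 + s11 * 256 + s12 * 512 + s13 * 1024 + s14 * 2048 + s15 * 4096) from by ring]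
    exact l_xsplit a2 s2 (a3 * 1 + a4 * 2 + a5 * 4 + a6 * 8 + a7 * 16 + a8 * 32 + a9 * 64 + a10 * 128 + a11 * 256 + a12 * 512 + a13 * 1024 + a14 * 2048 + a15 * 4096) (s3 * 1 + s4 * 2 + s5 * 4 + s6 * 8 + s7 * 16 + s8 * 32 + s9 * 64 + s10 * 128 + s11 * 256 + s12 * 512 + s13 * 1024 + s14 * 2048 + s15 * 4096) (by omega) (by omega) (by omega) (by omega)]
  rw [show PySem.Int.bxor (a3 * 1 + a4 * 2 + a5 * 4 + a6 * 8 + a7 * 16 + a8 * 32 + a9 * 64 + a10 * 128 + a11 * 256 + a12 * 512 + a13 * 1024 + a14 * 2048 + a15 * 4096) (s3 * 1 + s4 * 2 + s5 * 4 + s6 * 8 + s7 * 16 + s8 * 32 + s9 * 64 + s10 * 128 + s11 * 256 + s12 * 512 + s13 * 1024 + s14 * 2048 + s15 * 4096) = PySem.Int.bxor a3 s3 + 2 * PySem.Int.bxor (a4 * 1 + a5 * 2 + a6 * 4 + a7 * 8 + a8 * 16 + a9 * 32 + a10 * 64 + a11 * 128 + a12 * 256 + a13 * 512 + a14 * 1024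 + a15 * 2048) (s4 * 1 + s5 * 2 + s6 * 4 + s7 * 8 + s8 * 16 + s9 * 32 + s10 * 64 + s11 * 128 + s12 * 256 + s13 * 512 + s14 * 1024 + s15 * 2048) from by
    conv_lhs => rw [show (a3 * 1 + a4 * 2 + a5 * 4 + a6 * 8 + a7 * 16 + a8 * 32 + a9 * 64 + a10 * 128 + a11 * 256 + a12 * 512 + a13 * 1024 + a14 * 2048 + a15 * 4096 : Int) = a3 + 2*(a4 * 1 + a5 * 2 + a6 * 4 + a7 * 8 + a8 * 16 + a9 * 32 + a10 * 64 + a11 * 128 + a12 * 256 + a13 * 512 + a14 * 1024 + a15 * 2048) from by ring,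
        show (s3 * 1 + s4 * 2 + s5 * 4 + s6 * 8 + s7 * 16 + s8 * 32 + s9 * 64 + s10 * 128 + s11 * 256 + s12 * 512 + s13 * 1024 + s14 * 2048 + s15 * 4096 : Int) = s3 + 2*(s4 * 1 + s5 * 2 + s6 * 4 + s7 * 8 + s8 * 16 + s9 * 32 + s10 * 64 + s11 * 128 + s12 * 256 + s13 * 512 + s14 * 1024 + s15 * 2048) from by ring]
    exact l_xsplit a3 s3 (a4 * 1 + a5 * 2 + a6 * 4 + a7 * 8 + a8 * 16 + a9 * 32 + a10 * 64 + a11 * 128 + a12 * 256 + a13 * 512 + a14 * 1024 + a15 * 2048) (s4 * 1 + s5 * 2 + s6 * 4 + s7 * 8 + s8 * 16 + s9 * 32 + s10 * 64 + s11 * 128 + s12 * 256 + s13 * 512 + s14 * 1024 + s15 * 2048) (by omega) (by omega) (by omega) (by omega)]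
  rw [show PySem.Int.bxor (a4 * 1 + a5 * 2 + a6 * 4 + a7 * 8 + a8 * 16 + a9 * 32 + a10 * 64 + a11 * 128 + a12 * 256 + a13 * 512 + a14 * 1024 + a15 * 2048) (s4 * 1 + s5 * 2 + s6 * 4 + s7 * 8 + s8 * 16 + s9 * 32 + s10 * 64 + s11 * 128 + s12 * 256 + s13 * 512 + s14 * 1024 + s15 * 2048) = PySem.Int.bxor a4 s4 + 2 * PySem.Int.bxor (a5 * 1 + a6 * 2 + a7 * 4 + a8 * 8 + a9 * 16 + a10 * 32 + a11 * 64 + a12 * 128 + a13 * 256 + a14 * 512 + a15 * 1024) (s5 * 1 + s6 * 2 + s7 * 4 + s8 * 8 + s9 * 16 + s10 * 32 + s11 * 64 + s12 * 128 + s13 * 256 + s14 * 512 + s15 * 1024) from by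
    conv_lhs => rw [show (a4 * 1 + a5 * 2 + a6 * 4 + a7 * 8 + a8 * 16 + a9 * 32 + a10 * 64 + a11 * 128 + a12 * 256 + a13 * 512 + a14 * 1024 + a15 * 2048 : Int) = a4 + 2*(a5 * 1 + a6 * 2 + a7 * 4 + a8 * 8 + a9 * 16 + a10 * 32 + a11 * 64 + a12 * 128 + a13 * 256 + a14 * 512 + a15 * 1024) from by ring,
        show (s4 * 1 + s5 * 2 + s6 * 4 + s7 * 8 + s8 * 16 + s9 * 32 + s10 * 64 + s11 * 128 + s12 * 256 + s13 * 512 + s14 * 1024 + s15 * 2048 : Int) = s4 + 2*(s5 * 1 + s6 * 2 + s7 * 4 + s8 * 8 + s9 * 16 + s10 * 32 + s11 * 64 + s12 * 128 + s13 * 256 + s14 * 512 + s15 * 1024) from by ring]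
    exact l_xsplit a4 s4 (a5 * 1 + a6 * 2 + a7 * 4 + a8 * 8 + a9 * 16 + a10 * 32 + a11 * 64 + a12 * 128 + a13 * 256 + a14 * 512 + a15 * 1024) (s5 * 1 + s6 * 2 + s7 * 4 + s8 * 8 + s9 * 16 + s10 * 32 + s11 * 64 + s12 * 128 + s13 * 256 + s14 * 512 + s15 * 1024) (by omega) (by omega) (by omega) (by omega)]
  rw [show PySem.Int.bxor (a5 * 1 + a6 * 2 + a7 * 4 + a8 * 8 + a9 * 16 + a10 * 32 + a11 * 64 + a12 * 128 + a13 * 256 + a14 * 512 + a15 * 1024) (s5 * 1 + s6 * 2 + s7 * 4 + s8 * 8 + s9 * 16 + s10 * 32 + s11 * 64 + s12 * 128 + s13 * 256 + s14 * 512 + s15 * 1024) = PySem.Int.bxor a5 s5 + 2 * PySem.Int.bxor (a6 * 1 + a7 * 2 + a8 * 4 + a9 * 8 + a10 * 16 + a11 * 32 + a12 * 64 + a13 * 128 + a14 * 256 + a15 * 512) (s6 * 1 + s7 * 2 + s8 * 4 + s9 * 8 + s10 * 16 + s11 * 32 + s12 * 64 + s13 * 128 + s14 * 256 + s15 * 512)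 from by
    conv_lhs => rw [show (a5 * 1 + a6 * 2 + a7 * 4 + a8 * 8 + a9 * 16 + a10 * 32 + a11 * 64 + a12 * 128 + a13 * 256 + a14 * 512 + a15 * 1024 : Int) = a5 + 2*(a6 * 1 + a7 * 2 + a8 * 4 + a9 * 8 + a10 * 16 + a11 * 32 + a12 * 64 + a13 * 128 + a14 * 256 + a15 * 512) from by ring,
        show (s5 * 1 + s6 * 2 + s7 * 4 + s8 * 8 + s9 * 16 + s10 * 32 + s11 * 64 + s12 * 128 + s13 * 256 + s14 * 512 + s15 * 1024 : Int) = s5 + 2*(s6 * 1 + s7 * 2 + s8 * 4 + s9 * 8 + s10 * 16 + s11 * 32 + s12 * 64 + s13 * 128 + s14 * 256 + s15 * 512) from by ring]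
    exact l_xsplit a5 s5 (a6 * 1 + a7 * 2 + a8 * 4 + a9 * 8 + a10 * 16 + a11 * 32 + a12 * 64 + a13 * 128 + a14 * 256 + a15 * 512) (s6 * 1 + s7 * 2 + s8 * 4 + s9 * 8 + s10 * 16 + s11 * 32 + s12 * 64 + s13 * 128 + s14 * 256 + s15 * 512) (by omega) (by omega) (by omega) (by omega)]
  rw [show PySem.Int.bxor (a6 * 1 + a7 * 2 + a8 * 4 + a9 * 8 + a10 * 16 + a11 * 32 + a12 * 64 + a13 * 128 + a14 * 256 + a15 * 512) (s6 * 1 + s7 * 2 + s8 * 4 + s9 * 8 + s10 * 16 + s11 * 32 + s12 * 64 + s13 * 128 + s14 * 256 + s15 * 512) = PySem.Int.bxor a6 s6 + 2 * PySem.Int.bxor (a7 * 1 + a8 * 2 + a9 * 4 + a10 * 8 + a11 * 16 + a12 * 32 + a13 * 64 + a14 * 128 + a15 * 256) (s7 * 1 + s8 * 2 + s9 * 4 + s10 * 8 + s11 * 16 + s12 * 32 + s13 * 64 + s14 * 128 + s15 * 256) from by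
    conv_lhs => rw [show (a6 * 1 + a7 * 2 + a8 * 4 + a9 * 8 + a10 * 16 + a11 * 32 + a12 * 64 + a13 * 128 + a14 * 256 + a15 * 512 : Int) = a6 + 2*(a7 * 1 + a8 * 2 + a9 * 4 + a10 * 8 + a11 * 16 + a12 * 32 + a13 * 64 + a14 * 128 + a15 * 256) from by ring,
        show (s6 * 1 + s7 * 2 + s8 * 4 + s9 * 8 + s10 * 16 + s11 * 32 + s12 * 64 + s13 * 128 + s14 * 256 + s15 * 512 : Int) = s6 + 2*(s7 * 1 + s8 * 2 + s9 * 4 + s10 * 8 + s11 * 16 + s12 * 32 + s13 * 64 + s14 * 128 + s15 * 256) from by ring]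
    exact l_xsplit a6 s6 (a7 * 1 + a8 * 2 + a9 * 4 + a10 * 8 + a11 * 16 + a12 * 32 + a13 * 64 + a14 * 128 + a15 * 256) (s7 * 1 + s8 * 2 + s9 * 4 + s10 * 8 + s11 * 16 + s12 * 32 + s13 * 64 + s14 * 128 + s15 * 256) (by omega) (by omega) (by omega) (by omega)]
  rw [show PySem.Int.bxor (a7 * 1 + a8 * 2 + a9 * 4 + a10 * 8 + a11 * 16 + a12 * 32 + a13 * 64 + a14 * 128 + a15 * 256) (s7 * 1 + s8 * 2 + s9 * 4 + s10 * 8 + s11 * 16 + s12 * 32 + s13 * 64 + s14 * 128 + s15 * 256) = PySem.Int.bxor a7 s7 + 2 * PySem.Int.bxor (a8 * 1 + a9 * 2 + a10 * 4 + a11 * 8 + a12 * 16 + a13 * 32 + a14 * 64 + a15 * 128) (s8 * 1 + s9 * 2 + s10 * 4 + s11 * 8 + s12 * 16 + s13 * 32 + s14 * 64 + s15 * 128) from by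
    conv_lhs => rw [show (a7 * 1 + a8 * 2 + a9 * 4 + a10 * 8 + a11 * 16 + a12 * 32 + a13 * 64 + a14 * 128 + a15 * 256 : Int) = a7 + 2*(a8 * 1 + a9 * 2 + a10 * 4 + a11 * 8 + a12 * 16 + a13 * 32 + a14 * 64 + a15 * 128) from by ring,
        show (s7 * 1 + s8 * 2 + s9 * 4 + s10 * 8 + s11 * 16 + s12 * 32 + s13 * 64 + s14 * 128 + s15 * 256 : Int) = s7 + 2*(s8 * 1 + s9 * 2 + s10 * 4 + s11 * 8 + s12 * 16 + s13 * 32 + s14 * 64 + s15 * 128) from by ring]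
    exact l_xsplit a7 s7 (a8 * 1 + a9 * 2 + a10 * 4 + a11 * 8 + a12 * 16 + a13 * 32 + a14 * 64 + a15 * 128) (s8 * 1 + s9 * 2 + s10 * 4 + s11 * 8 + s12 * 16 + s13 * 32 + s14 * 64 + s15 * 128) (by omega) (by omega) (by omega) (by omega)]
  rw [show PySem.Int.bxor (a8 * 1 + a9 * 2 + a10 * 4 + a11 * 8 + a12 * 16 + a13 * 32 + a14 * 64 + a15 * 128) (s8 * 1 + s9 * 2 + s10 * 4 + s11 * 8 + s12 * 16 + s13 * 32 + s14 * 64 + s15 * 128) = PySem.Int.bxor a8 s8 + 2 * PySem.Int.bxor (a9 * 1 + a10 * 2 + a11 * 4 + a12 * 8 + a13 * 16 + a14 * 32 + a15 * 64) (s9 * 1 + s10 * 2 + s11 * 4 + s12 * 8 + s13 * 16 + s14 * 32 + s15 * 64) from by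
    conv_lhs => rw [show (a8 * 1 + a9 * 2 + a10 * 4 + a11 * 8 + a12 * 16 + a13 * 32 + a14 * 64 + a15 * 128 : Int) = a8 + 2*(a9 * 1 + a10 * 2 + a11 * 4 + a12 * 8 + a13 * 16 + a14 * 32 + a15 * 64) from by ring,
        show (s8 * 1 + s9 * 2 + s10 * 4 + s11 * 8 + s12 * 16 + s13 * 32 + s14 * 64 + s15 * 128 : Int) = s8 + 2*(s9 * 1 + s10 * 2 + s11 * 4 + s12 * 8 + s13 * 16 + s14 * 32 + s15 * 64) from by ring]
    exact l_xsplit a8 s8 (a9 * 1 + a10 * 2 + a11 * 4 + a12 * 8 + a13 * 16 + a14 * 32 + a15 * 64) (s9 * 1 + s10 * 2 + s11 * 4 + s12 * 8 + s13 * 16 + s14 * 32 + s15 * 64) (by omega) (by omega) (by omega) (by omega)]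
  rw [show PySem.Int.bxor (a9 * 1 + a10 * 2 + a11 * 4 + a12 * 8 + a13 * 16 + a14 * 32 + a15 * 64) (s9 * 1 + s10 * 2 + s11 * 4 + s12 * 8 + s13 * 16 + s14 * 32 + s15 * 64) = PySem.Int.bxor a9 s9 + 2 * PySem.Int.bxor (a10 * 1 + a11 * 2 + a12 * 4 + a13 * 8 + a14 * 16 + a15 * 32) (s10 * 1 + s11 * 2 + s12 * 4 + s13 * 8 + s14 * 16 + s15 * 32) from by
    conv_lhs => rw [show (a9 * 1 + a10 * 2 + a11 * 4 + a12 * 8 + a13 * 16 + a14 * 32 + a15 * 64 : Int) = a9 + 2*(a10 * 1 + a11 * 2 + a12 * 4 + a13 * 8 + a14 * 16 + a15 * 32) from by ring,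
        show (s9 * 1 + s10 * 2 + s11 * 4 + s12 * 8 + s13 * 16 + s14 * 32 + s15 * 64 : Int) = s9 + 2*(s10 * 1 + s11 * 2 + s12 * 4 + s13 * 8 + s14 * 16 + s15 * 32) from by ring]
    exact l_xsplit a9 s9 (a10 * 1 + a11 * 2 + a12 * 4 + a13 * 8 + a14 * 16 + a15 * 32) (s10 * 1 + s11 * 2 + s12 * 4 + s13 * 8 + s14 * 16 + s15 * 32) (by omega) (by omega) (by omega) (by omega)]
  rw [show PySem.Int.bxor (a10 * 1 + a11 * 2 + a12 * 4 + a13 * 8 + a14 * 16 + a15 * 32) (s10 * 1 + s11 * 2 + s12 * 4 + s13 * 8 + s14 * 16 + s15 * 32) = PySem.Int.bxor a10 s10 + 2 * PySem.Int.bxor (a11 * 1 + a12 * 2 + a13 * 4 + a14 * 8 + a15 * 16) (s11 * 1 + s12 * 2 + s13 * 4 + s14 * 8 + s15 * 16) from by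
    conv_lhs => rw [show (a10 * 1 + a11 * 2 + a12 * 4 + a13 * 8 + a14 * 16 + a15 * 32 : Int) = a10 + 2*(a11 * 1 + a12 * 2 + a13 * 4 + a14 * 8 + a15 * 16) from by ring,
        show (s10 * 1 + s11 * 2 + s12 * 4 + s13 * 8 + s14 * 16 + s15 * 32 : Int) = s10 + 2*(s11 * 1 + s12 * 2 + s13 * 4 + s14 * 8 + s15 * 16) from by ring]
    exact l_xsplit a10 s10 (a11 * 1 + a12 * 2 + a13 * 4 + a14 * 8 + a15 * 16) (s11 * 1 + s12 * 2 + s13 * 4 + s14 * 8 + s15 * 16) (by omega) (by omega) (by omega) (by omega)]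
  rw [show PySem.Int.bxor (a11 * 1 + a12 * 2 + a13 * 4 + a14 * 8 + a15 * 16) (s11 * 1 + s12 * 2 + s13 * 4 + s14 * 8 + s15 * 16) = PySem.Int.bxor a11 s11 + 2 * PySem.Int.bxor (a12 * 1 + a13 * 2 + a14 * 4 + a15 * 8) (s12 * 1 + s13 * 2 + s14 * 4 + s15 * 8) from by
    conv_lhs => rw [show (a11 * 1 + a12 * 2 + a13 * 4 + a14 * 8 + a15 * 16 : Int) = a11 + 2*(a12 * 1 + a13 * 2 + a14 * 4 + a15 * 8) from by ring,
        show (s11 * 1 + s12 * 2 + s13 * 4 + s14 * 8 + s15 * 16 : Int) = s11 + 2*(s12 * 1 + s13 * 2 + s14 * 4 + s15 * 8) from by ring]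
    exact l_xsplit a11 s11 (a12 * 1 + a13 * 2 + a14 * 4 + a15 * 8) (s12 * 1 + s13 * 2 + s14 * 4 + s15 * 8) (by omega) (by omega) (by omega) (by omega)]
  rw [show PySem.Int.bxor (a12 * 1 + a13 * 2 + a14 * 4 + a15 * 8) (s12 * 1 + s13 * 2 + s14 * 4 + s15 * 8) = PySem.Int.bxor a12 s12 + 2 * PySem.Int.bxor (a13 * 1 + a14 * 2 + a15 * 4) (s13 * 1 + s14 * 2 + s15 * 4) from by
    conv_lhs => rw [show (a12 * 1 + a13 * 2 + a14 * 4 + a15 * 8 : Int) = a12 + 2*(a13 * 1 + a14 * 2 + a15 * 4) from by ring,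
        show (s12 * 1 + s13 * 2 + s14 * 4 + s15 * 8 : Int) = s12 + 2*(s13 * 1 + s14 * 2 + s15 * 4) from by ring]
    exact l_xsplit a12 s12 (a13 * 1 + a14 * 2 + a15 * 4) (s13 * 1 + s14 * 2 + s15 * 4) (by omega) (by omega) (by omega) (by omega)]
  rw [show PySem.Int.bxor (a13 * 1 + a14 * 2 + a15 * 4) (s13 * 1 + s14 * 2 + s15 * 4) = PySem.Int.bxor a13 s13 + 2 * PySem.Int.bxor (a14 * 1 + a15 * 2) (s14 * 1 + s15 * 2) from by
    conv_lhs => rw [show (a13 * 1 + a14 * 2 + a15 * 4 : Int) = a13 + 2*(a14 * 1 + a15 * 2) from by ring,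
        show (s13 * 1 + s14 * 2 + s15 * 4 : Int) = s13 + 2*(s14 * 1 + s15 * 2) from by ring]
    exact l_xsplit a13 s13 (a14 * 1 + a15 * 2) (s14 * 1 + s15 * 2) (by omega) (by omega) (by omega) (by omega)]
  rw [show PySem.Int.bxor (a14 * 1 + a15 * 2) (s14 * 1 + s15 * 2) = PySem.Int.bxor a14 s14 + 2 * PySem.Int.bxor (a15 * 1) (s15 * 1) from by
    conv_lhs => rw [show (a14 * 1 + a15 * 2 : Int) = a14 + 2*(a15 * 1) from by ring,
        show (s14 * 1 + s15 * 2 : Int) = s14 + 2*(s15 * 1) from by ring]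
    exact l_xsplit a14 s14 (a15 * 1) (s15 * 1) (by omega) (by omega) (by omega) (by omega)]
  rw [show PySem.Int.bxor (a15 * 1) (s15 * 1) = PySem.Int.bxor a15 s15 from by rw [show (a15 * 1 : Int) = a15 from by ring, show (s15 * 1 : Int) = s15 from by ring]]
  ring

set_option maxHeartbeats 2000000 in
theorem main_eq (y rk : Int) : round_func y rk = round_func_alt y rk := by
  unfold round_func round_func_alt
  rw [show PySem.List.pyRange 0 (PySem.Int.floordiv 16 2) 1 = [0,1,2,3,4,5,6,7] from by decide,
      show PySem.List.pyRange (PySem.Int.floordiv 16 2) 16 1 = [8,9,10,11,12,13,14,15] from by decide,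
      show PySem.List.pyRange 0 8 1 = [0,1,2,3,4,5,6,7] from by decide]
  simp only [List.foldl]
  norm_num [l_bit0, l_mask, l_mask32, l_mask4, Int.shiftRight_eq_div_pow]
  simp only [show Int.toNat 2 = 2 from rfl, show Int.toNat 3 = 3 from rfl, show Int.toNat 4 = 4 from rfl, show Int.toNat 5 = 5 from rfl, show Int.toNat 6 = 6 from rfl, show Int.toNat 7 = 7 from rfl, show Int.toNat 8 = 8 from rfl, show Int.toNat 9 = 9 from rfl, show Int.toNat 10 = 10 from rfl, show Int.toNat 11 = 11 from rfl, show Int.toNat 12 = 12 from rfl, show Int.toNat 13 = 13 from rfl, show Int.toNat 14 = 14 from rfl, show Int.toNat 15 = 15 from rfl, show Int.toNat 16 = 16 from rfl, show Int.toNat 19 = 19 from rfl, show Int.toNat 20 = 20 from rfl, show Int.toNat 23 = 23 from rfl, show Int.toNat 24 = 24 from rfl, show Int.toNat 27 = 27 from rfl, show Int.toNat 28 = 28 from rfl, show Int.toNat 31 = 31 from rfl]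
  norm_num
  have HL := chain8 (rk % 2) (rk % 4294967296 / 16 % 2) (rk % 4294967296 / 256 % 2) (rk % 4294967296 / 4096 % 2) (rk % 4294967296 / 65536 % 2) (rk % 4294967296 / 1048576 % 2) (rk % 4294967296 / 16777216 % 2) (rk % 4294967296 / 268435456 % 2) (by omega) (by omega) (by omega) (by omega) (by omega) (by omega) (by omega) (by omega)
  have HH := chain8 (rk % 16 / 8 % 2) (rk % 4294967296 / 16 % 16 / 8 % 2) (rk % 4294967296 / 256 % 16 / 8 % 2) (rk % 4294967296 / 4096 % 16 / 8 % 2) (rk % 4294967296 / 65536 % 16 / 8 % 2) (rk % 4294967296 / 1048576 % 16 / 8 % 2) (rk % 4294967296 / 16777216 % 16 / 8 % 2) (rk % 4294967296 / 268435456 % 16 / 8 % 2) (by omega) (by omega) (by omega) (by omega) (by omega) (by omega) (by omega) (by omega)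
  rw [HL, HH]
  clear HL HH
  rw [show (rk % 4294967296 / 16 % 2 : Int) = rk / 16 % 2 from by omega]
  rw [show (rk % 4294967296 / 256 % 2 : Int) = rk / 256 % 2 from by omega]
  rw [show (rk % 4294967296 / 4096 % 2 : Int) = rk / 4096 % 2 from by omega]
  rw [show (rk % 4294967296 / 65536 % 2 : Int) = rk / 65536 % 2 from by omega]
  rw [show (rk % 4294967296 / 1048576 % 2 : Int) = rk / 1048576 % 2 from by omega]
  rw [show (rk % 4294967296 / 16777216 % 2 : Int) = rk / 16777216 % 2 from by omega]
  rw [show (rk % 4294967296 / 268435456 % 2 : Int) = rk / 268435456 % 2 from by omega]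
  rw [show (rk % 16 / 8 % 2 : Int) = rk / 8 % 2 from by omega]
  rw [show (rk % 4294967296 / 16 % 16 / 8 % 2 : Int) = rk / 128 % 2 from by omega]
  rw [show (rk % 4294967296 / 256 % 16 / 8 % 2 : Int) = rk / 2048 % 2 from by omega]
  rw [show (rk % 4294967296 / 4096 % 16 / 8 % 2 : Int) = rk / 32768 % 2 from by omega]
  rw [show (rk % 4294967296 / 65536 % 16 / 8 % 2 : Int) = rk / 524288 % 2 from by omega]
  rw [show (rk % 4294967296 / 1048576 % 16 / 8 % 2 : Int) = rk / 8388608 % 2 from by omega]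
  rw [show (rk % 4294967296 / 16777216 % 16 / 8 % 2 : Int) = rk / 134217728 % 2 from by omega]
  rw [show (rk % 4294967296 / 268435456 % 16 / 8 % 2 : Int) = rk / 2147483648 % 2 from by omega]
  rw [show (y % 65536 : Int) = y % 2 * 1 + y / 2 % 2 * 2 + y / 4 % 2 * 4 + y / 8 % 2 * 8 + y / 16 % 2 * 16 + y / 32 % 2 * 32 + y / 64 % 2 * 64 + y / 128 % 2 * 128 + y / 256 % 2 * 256 + y / 512 % 2 * 512 + y / 1024 % 2 * 1024 + y / 2048 % 2 * 2048 + y / 4096 % 2 * 4096 + y / 8192 % 2 * 8192 + y / 16384 % 2 * 16384 + y / 32768 % 2 * 32768 from by omega]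
  exact assemble (y % 2) (y / 2 % 2) (y / 4 % 2) (y / 8 % 2) (y / 16 % 2) (y / 32 % 2) (y / 64 % 2) (y / 128 % 2) (y / 256 % 2) (y / 512 % 2) (y / 1024 % 2) (y / 2048 % 2) (y / 4096 % 2) (y / 8192 % 2) (y / 16384 % 2) (y / 32768 % 2) (rk % 2) (rk / 16 % 2) (rk / 256 % 2) (rk / 4096 % 2) (rk / 65536 % 2) (rk / 1048576 % 2) (rk / 16777216 % 2) (rk / 268435456 % 2) (rk / 8 % 2) (rk / 128 % 2) (rk / 2048 % 2) (rk / 32768 % 2) (rk / 524288 % 2) (rk / 8388608 % 2) (rk / 134217728 % 2) (rk / 2147483648 % 2) (by omega) (by omega) (by omega) (by omega) (by omega) (by omega) (by omega) (by omega) (by omega) (by omega) (by omega) (by omega) (by omega) (by omega) (by omega) (by omega) (by omega) (by omega) (by omega) (by omega) (by omega) (by omega) (by omega) (by omega) (by omega) (by omega) (by omega) (by omega) (by omega) (by omega) (by omega) (by omega)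

-- ===== VERDICT (by name: the statement is the Claim_ definition above) =====
theorem round_func_spec : Claim_equal_round_func := by
  intro y rk _
  show round_func y rk = round_func_alt y rk
  exact main_eq y rk
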